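-- pv_equiv track=rewrite | github.com/gabridefreitas/teoria_informacao | algorithms/fibonacci_zeckendorf.py | decode_fibonacci_zeckendorf
-- ===== SOURCE A (Python) =====
-- def decode_fibonacci_zeckendorf(code):
--     ret=""
--     current_index = 0
--
--     while current_index < len(code):
--         end_index = code.find('11', current_index) #acha o index do primeiro 11
--
--         if end_index == -1:
--             return ret;
--         end_index+=1 #compensa o index pra pegar o 1 faltante
--         string_code = code[current_index:end_index]
--         ret+=chr(decode_char(string_code))
--         current_index=end_index+1 #compensa o index para pegar o proximo codigo
--
--     return ret
--
-- def decode_char(code):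
--     code = code[::-1] #reverte o codigo para poder decodar ie. 00010001 vai virar 10001000
--     result = 0
--     fib = [0, 1]
--     while len(fib) < len(code) + 2:
--         next_fib = fib[-1] + fib[-2]
--         fib.append(next_fib)
--     for i in range(len(code)):
--         if code[len(code) - 1 - i] == "1":
--             result += fib[i + 2]
--     return result
-- ===== SOURCE B (Python) =====
-- def decode_fibonacci_zeckendorf(code):
--     out = []
--     acc = 0
--     a, b = 1, 2  # a = Fib(pos+2), b = Fib(pos+3) for the current in-codeword position
--     i, n = 0, len(code)
--     while i < n:
--         if code[i] == '1':
--             if i + 1 < n and code[i + 1] == '1':  # terminator "11": first '1' is a data bit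
--                 out.append(chr(acc + a))
--                 acc = 0
--                 a, b = 1, 2
--                 i += 2
--                 continue
--             acc += a
--         a, b = b, a + b
--         i += 1
--     return ''.join(out)  # trailing bits with no terminator are discarded, as in A
-- ===== Notes on version B (the rewrite author's own statement) =====
-- stated objective: simpler
-- what changed: A re-finds the next '11' with str.find, slices out each codeword, reverses it and rebuilds a Fibonacci list per codeword; B is one left-to-right pass that keeps a running accumulator and an incrementally updated Fibonacci pair, with no find, no slicing, no reversal and no per-codeword fib table.
-- outside the precondition, e.g. on decode_fibonacci_zeckendorf('000100001001001010100001010011'): A raises ValueError, B raises ValueError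
import Mathlib
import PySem

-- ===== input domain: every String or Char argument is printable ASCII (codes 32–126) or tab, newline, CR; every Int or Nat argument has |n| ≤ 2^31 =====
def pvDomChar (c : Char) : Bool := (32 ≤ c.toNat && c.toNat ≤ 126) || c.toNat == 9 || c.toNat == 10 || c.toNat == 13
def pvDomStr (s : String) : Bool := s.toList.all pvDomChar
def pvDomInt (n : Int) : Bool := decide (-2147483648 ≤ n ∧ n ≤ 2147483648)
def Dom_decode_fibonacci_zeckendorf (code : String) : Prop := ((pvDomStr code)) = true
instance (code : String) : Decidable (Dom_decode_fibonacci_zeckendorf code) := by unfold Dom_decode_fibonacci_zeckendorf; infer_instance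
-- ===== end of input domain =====

-- B replaces A's find('11')/slice/reverse/fib-rebuild per codeword by one left-to-right pass
-- that keeps a running Fibonacci pair (objective: simpler single-pass decomposition).

-- ===== PORT A =====
-- code.find('11', start): left-to-right scan from start, none = -1 (exact for this fixed two-char needle)
def pvFind11Aux : List Char → Option Nat
  | [] => none
  | c :: t => if c = '1' ∧ t.head? = some '1' then some 0 else (pvFind11Aux t).map (· + 1)

def pvFind11 (cs : List Char) (start : Nat) : Option Nat :=
  (pvFind11Aux (cs.drop start)).map (· + start)

-- the while loop of decode_char building fib = [0, 1, 1, 2, …]; fuel makes it total (each pass appends one element)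
-- fib[-1] + fib[-2]: fib.length ≥ 2 throughout, so Python's negative indexing is exactly these getD's
def pvBuildFib (fib : List Nat) (target fuel : Nat) : List Nat :=
  match fuel with
  | 0 => fib
  | fuel + 1 =>
    if fib.length < target then
      pvBuildFib (fib ++ [fib.getD (fib.length - 1) 0 + fib.getD (fib.length - 2) 0]) target fuel
    else fib

-- port of decode_char; the reversal and the reversed indexing (both in range in Python) are kept
def pvDecodeChar (code : List Char) : Nat :=
  let codeR := code.reverse     -- code = code[::-1]
  let fib := pvBuildFib [0, 1] (codeR.length + 2) (codeR.length + 2)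
  (List.range codeR.length).foldl
    (fun result i => if codeR.getD (codeR.length - 1 - i) ' ' = '1' then result + fib.getD (i + 2) 0 else result)
    0

-- the while loop of A, state (current_index, ret) as in Python; fuel makes it total
-- (current_index strictly increases each pass); chr = Char.ofNat, exact on valid code points (guaranteed by Pre_)
def pvGoA (cs : List Char) (fuel : Nat) (cur : Nat) (ret : List Char) : List Char :=
  match fuel with
  | 0 => ret
  | fuel + 1 =>
    if cur < cs.length then
      match pvFind11 cs cur with
      | none => ret
      | some e =>
        let e := e + 1
        let stringCode := PySem.List.slice cs (some (cur : Int)) (some (e : Int))  -- code[current_index:end_index]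
        pvGoA cs fuel (e + 1) (ret ++ [Char.ofNat (pvDecodeChar stringCode)])
    else ret

def decode_fibonacci_zeckendorf (code : String) : String :=
  String.ofList (pvGoA code.toList (code.toList.length + 1) 0 [])

-- ===== PORT B =====
-- single pass: acc = value of current codeword so far, (a, b) = (Fib(pos+2), Fib(pos+3)) for the current position
def pvGoB : List Char → Nat → Nat → Nat → List Char
  | [], _, _, _ => []
  | c :: rest, acc, a, b =>
    if c = '1' then
      if rest.head? = some '1' then
        Char.ofNat (acc + a) :: pvGoB rest.tail 0 1 2
      else pvGoB rest (acc + a) b (a + b)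
    else pvGoB rest acc b (a + b)
termination_by l => l.length
decreasing_by all_goals (simp [List.length_tail]; try omega)

def decode_fibonacci_zeckendorf_alt (code : String) : String :=
  String.ofList (pvGoB code.toList 0 1 2)

-- ===== PRECONDITION & SPEC =====
-- helpers for Pre_ only (not used by either port): the "11"-terminated codewords of the input,
-- and the Zeckendorf value of a codeword (bit at position i weighs Nat.fib (i + 2))
def pvWords : List Char → List Char → List (List Char)
  | [], _ => []
  | [_], _ => []
  | c :: d :: rest, cur =>
    if c = '1' ∧ d = '1' then (cur ++ [c]) :: pvWords rest []
    else pvWords (d :: rest) (cur ++ [c])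

def pvValF : List Char → Nat → Nat
  | [], _ => 0
  | c :: t, k => (if c = '1' then Nat.fib k else 0) + pvValF t (k + 1)

-- Pre_ excludes exactly the codes in which some "11"-terminated codeword decodes to a value
-- above 0x10FFFF (there Python's chr raises ValueError in both A and B) or to a surrogate
-- code point 0xD800–0xDFFF (there A and B both return that one-character string, which has no
-- representation as a Lean String/Char); everywhere else A returns an ordinary string B matches.
def Pre_decode_fibonacci_zeckendorf (code : String) : Prop :=
  ∀ w ∈ pvWords code.toList [],
    pvValF w 2 ≤ 1114111 ∧ (pvValF w 2 < 55296 ∨ 57344 ≤ pvValF w 2)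
instance (code : String) : Decidable (Pre_decode_fibonacci_zeckendorf code) := by
  unfold Pre_decode_fibonacci_zeckendorf; infer_instance

def pvWitness_decode_fibonacci_zeckendorf : String := "011011"

def Spec_decode_fibonacci_zeckendorf (code : String) (out : String) : Prop := out = decode_fibonacci_zeckendorf_alt code
instance (code : String) (out : String) : Decidable (Spec_decode_fibonacci_zeckendorf code out) := by unfold Spec_decode_fibonacci_zeckendorf; infer_instance

-- ===== CLAIM (what is proved, stated in full; the proofs are below) =====
def Claim_equal_decode_fibonacci_zeckendorf : Prop := ∀ (code : String), Dom_decode_fibonacci_zeckendorf code → Pre_decode_fibonacci_zeckendorf code → Spec_decode_fibonacci_zeckendorf code (decode_fibonacci_zeckendorf code)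

-- ===== LEMMAS AND PROOFS =====

-- the same sum with an abstract weight, for the foldl-over-range bridge
def pvValW : List Char → (Nat → Nat) → Nat
  | [], _ => 0
  | c :: t, w => (if c = '1' then w 0 else 0) + pvValW t (fun i => w (i + 1))

lemma pvGoB_none : ∀ (l : List Char) (acc a b : Nat), pvFind11Aux l = none → pvGoB l acc a b = [] := by
  intro l
  induction l with
  | nil => intro acc a b _; simp [pvGoB]
  | cons c t ih =>
    intro acc a b h
    simp only [pvFind11Aux] at h
    split at h
    · exact absurd h (by simp)
    · rename_i hcond
      simp only [Option.map_eq_none_iff] at h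
      simp only [pvGoB]
      by_cases hc : c = '1'
      · have hh : ¬ t.head? = some '1' := fun hh => hcond ⟨hc, hh⟩
        simp [hc, hh, ih _ _ _ h]
      · simp [hc, ih _ _ _ h]

lemma pvGoB_seg : ∀ (w : List Char) (rest : List Char) (acc k : Nat),
    pvFind11Aux (w ++ ['1']) = none →
    pvGoB (w ++ '1' :: '1' :: rest) acc (Nat.fib (k + 2)) (Nat.fib (k + 3))
      = Char.ofNat (acc + pvValF (w ++ ['1']) (k + 2)) :: pvGoB rest 0 1 2 := by
  intro w
  induction w with
  | nil =>
    intro rest acc k _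
    simp [pvGoB, pvValF]
  | cons c t ih =>
    intro rest acc k hno
    simp only [List.cons_append, pvFind11Aux] at hno
    split at hno
    · exact absurd hno (by simp)
    · rename_i hcond
      simp only [Option.map_eq_none_iff] at hno
      have hfib : Nat.fib (k + 2) + Nat.fib (k + 3) = Nat.fib (k + 4) := by
        have h := Nat.fib_add_two (n := k + 2)
        rw [show k + 2 + 2 = k + 4 from by omega, show k + 2 + 1 = k + 3 from by omega] at h
        exact h.symm
      have ihr : ∀ acc', pvGoB (t ++ '1' :: '1' :: rest) acc' (Nat.fib (k + 3)) (Nat.fib (k + 4))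
          = Char.ofNat (acc' + pvValF (t ++ ['1']) (k + 3)) :: pvGoB rest 0 1 2 := by
        intro acc'
        have h := ih rest acc' (k + 1) hno
        rw [show k + 1 + 2 = k + 3 from by omega, show k + 1 + 3 = k + 4 from by omega] at h
        exact h
      by_cases hc : c = '1'
      · subst hc
        have hh : ¬ (t ++ ['1']).head? = some '1' := fun hh => hcond ⟨rfl, hh⟩
        cases t with
        | nil => exact absurd (by simp) hh
        | cons d t' =>
          have hd : ¬ d = '1' := by simpa using hh
          conv_lhs => rw [List.cons_append, pvGoB]
          rw [if_pos rfl, if_neg (by simp [hd]), hfib, ihr _]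
          simp [pvValF, Nat.add_assoc]
      · simp only [List.cons_append, pvGoB, if_neg hc]
        rw [hfib, ihr _]
        simp [pvValF, hc]

lemma pvFind11Aux_some : ∀ (l : List Char) (off : Nat), pvFind11Aux l = some off →
    off + 2 ≤ l.length ∧ pvFind11Aux (l.take off ++ ['1']) = none ∧
      l = l.take off ++ '1' :: '1' :: l.drop (off + 2) := by
  intro l
  induction l with
  | nil => intro off h; simp [pvFind11Aux] at h
  | cons c t ih =>
    intro off h
    simp only [pvFind11Aux] at h
    split at h
    · rename_i hcond
      obtain ⟨hc, hh⟩ := hcond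
      have hoff : off = 0 := by simpa using h.symm
      subst hoff; subst hc
      cases t with
      | nil => simp at hh
      | cons d t' =>
        have hd : d = '1' := by simpa using hh
        subst hd
        refine ⟨by simp, by simp [pvFind11Aux], by simp⟩
    · rename_i hcond
      match hmap : pvFind11Aux t with
      | none => rw [hmap] at h; simp at h
      | some off' =>
        rw [hmap] at h
        simp only [Option.map_some, Option.some.injEq] at h
        obtain ⟨hlen, hnone, hdec⟩ := ih off' hmap
        subst h
        refine ⟨by simp; omega, ?_, ?_⟩
        · simp only [List.take_succ_cons, List.cons_append, pvFind11Aux]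
          rw [if_neg, hnone, Option.map_none]
          intro hcontra
          obtain ⟨hc, hh⟩ := hcontra
          apply hcond
          refine ⟨hc, ?_⟩
          cases t with
          | nil => simp [pvFind11Aux] at hmap
          | cons d t' =>
            cases off' with
            | zero =>
              simp only [pvFind11Aux] at hmap
              split at hmap
              · rename_i hc2; simp [hc2.1]
              · rw [Option.map_eq_some_iff] at hmap
                obtain ⟨a, -, ha⟩ := hmap
                omega
            | succ off'' => simpa using hh
        · conv_lhs => rw [hdec]
          simp

lemma pvBuildFib_spec : ∀ (fuel : Nat) (l : List Nat) (target : Nat),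
    2 ≤ l.length → (∀ i < l.length, l.getD i 0 = Nat.fib i) →
    min target (l.length + fuel) ≤ (pvBuildFib l target fuel).length ∧
      ∀ i < (pvBuildFib l target fuel).length, (pvBuildFib l target fuel).getD i 0 = Nat.fib i := by
  intro fuel
  induction fuel with
  | zero =>
    intro l target h2 hv
    simp only [pvBuildFib]
    exact ⟨by omega, hv⟩
  | succ fuel ih =>
    intro l target h2 hv
    simp only [pvBuildFib]
    split
    · rename_i hlt
      have hx : l.getD (l.length - 1) 0 + l.getD (l.length - 2) 0 = Nat.fib l.length := by
        obtain ⟨m, hm⟩ : ∃ m, l.length = m + 2 := ⟨l.length - 2, by omega⟩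
        rw [hv (l.length - 1) (by omega), hv (l.length - 2) (by omega), hm]
        simp only [Nat.add_sub_cancel, show m + 2 - 1 = m + 1 from rfl]
        rw [Nat.fib_add_two]; omega
      have hv' : ∀ i < (l ++ [l.getD (l.length - 1) 0 + l.getD (l.length - 2) 0]).length,
          (l ++ [l.getD (l.length - 1) 0 + l.getD (l.length - 2) 0]).getD i 0 = Nat.fib i := by
        intro i hi
        simp only [List.length_append, List.length_cons, List.length_nil] at hi
        rcases Nat.lt_or_ge i l.length with hcase | hcase
        · rw [List.getD_append _ _ _ _ hcase]; exact hv i hcase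
        · have hieq : i = l.length := by omega
          subst hieq
          have hget : (l ++ [l.getD (l.length - 1) 0 + l.getD (l.length - 2) 0]).getD l.length 0
              = l.getD (l.length - 1) 0 + l.getD (l.length - 2) 0 := by simp
          rw [hget]
          exact hx
      have hres := ih (l ++ [l.getD (l.length - 1) 0 + l.getD (l.length - 2) 0]) target
        (by simp only [List.length_append, List.length_cons, List.length_nil]; omega) hv'
      constructor
      · have hl := hres.1
        simp only [List.length_append, List.length_cons, List.length_nil] at hl
        omega
      · exact hres.2
    · rename_i hge
      exact ⟨by omega, hv⟩

lemma pvFoldRange (c : List Char) (w : Nat → Nat) (r0 : Nat) :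
    (List.range c.length).foldl (fun r i => if c.getD i ' ' = '1' then r + w i else r) r0
      = r0 + pvValW c w := by
  induction c generalizing w r0 with
  | nil => simp [pvValW]
  | cons ch t ih =>
    simp only [List.length_cons, List.range_succ_eq_map, List.foldl_cons, List.foldl_map,
      List.getD_cons_succ, List.getD_cons_zero, pvValW]
    rw [ih (fun i => w (i + 1))]
    by_cases hch : ch = '1' <;> simp [hch] <;> omega

lemma pvValW_fib (c : List Char) : ∀ k, pvValW c (fun i => Nat.fib (i + k)) = pvValF c k := by
  induction c with
  | nil => intro k; simp [pvValW, pvValF]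
  | cons ch t ih =>
    intro k
    simp only [pvValW, pvValF, Nat.zero_add]
    rw [show (fun i => Nat.fib (i + 1 + k)) = (fun i => Nat.fib (i + (k + 1))) from by
      funext i; ring_nf, ih (k + 1)]

lemma pvDecodeChar_eq (c : List Char) : pvDecodeChar c = pvValF c 2 := by
  unfold pvDecodeChar
  simp only [List.length_reverse]
  have hfib := pvBuildFib_spec (c.length + 2) [0, 1] (c.length + 2) (by simp)
    (by intro i hi; simp only [List.length_cons, List.length_nil] at hi; interval_cases i <;> decide)
  have hlen : c.length + 2 ≤ (pvBuildFib [0, 1] (c.length + 2) (c.length + 2)).length := by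
    have := hfib.1; simp at this; omega
  have hcongr : (List.range c.length).foldl
      (fun result i => if c.reverse.getD (c.length - 1 - i) ' ' = '1' then
        result + (pvBuildFib [0, 1] (c.length + 2) (c.length + 2)).getD (i + 2) 0 else result) 0
      = (List.range c.length).foldl
      (fun result i => if c.getD i ' ' = '1' then result + Nat.fib (i + 2) else result) 0 := by
    apply PySem.List.foldl_congr_mem
    intro acc i hi
    rw [List.mem_range] at hi
    have h1 : c.reverse.getD (c.length - 1 - i) ' ' = c.getD i ' ' := by
      rw [List.getD_eq_getElem _ _ (by simp; omega), List.getD_eq_getElem _ _ hi]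
      rw [List.getElem_reverse]
      congr 1
      omega
    have h2 : (pvBuildFib [0, 1] (c.length + 2) (c.length + 2)).getD (i + 2) 0 = Nat.fib (i + 2) := by
      exact hfib.2 (i + 2) (by omega)
    rw [h1, h2]
  rw [hcongr, pvFoldRange c (fun i => Nat.fib (i + 2)) 0, pvValW_fib c 2]
  exact Nat.zero_add _

lemma pvGoA_eq : ∀ (fuel : Nat) (cs : List Char) (cur : Nat) (ret : List Char),
    cs.length - cur < fuel →
    pvGoA cs fuel cur ret = ret ++ pvGoB (cs.drop cur) 0 1 2 := by
  intro fuel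
  induction fuel with
  | zero => intro cs cur ret h; omega
  | succ fuel ih =>
    intro cs cur ret h
    simp only [pvGoA]
    by_cases hcur : cur < cs.length
    · rw [if_pos hcur]
      match hfind : pvFind11 cs cur with
      | none =>
        have haux : pvFind11Aux (cs.drop cur) = none := by
          unfold pvFind11 at hfind; simpa using hfind
        rw [pvGoB_none _ _ _ _ haux]; simp
      | some e =>
        obtain ⟨off, haux, hoff⟩ : ∃ off, pvFind11Aux (cs.drop cur) = some off ∧ e = off + cur := by
          unfold pvFind11 at hfind
          match hm : pvFind11Aux (cs.drop cur) with
          | none => rw [hm] at hfind; simp at hfind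
          | some o => rw [hm] at hfind; simp at hfind; exact ⟨o, rfl, hfind.symm⟩
        obtain ⟨hlen2, hnone, hdec⟩ := pvFind11Aux_some _ _ haux
        have hwlen : ((cs.drop cur).take off).length = off := by
          have h2 := hlen2
          simp only [List.length_drop] at h2
          simp only [List.length_take, List.length_drop]
          omega
        have hslice : PySem.List.slice cs (some (cur : Int)) (some ((e + 1 : Nat) : Int))
            = (cs.drop cur).take off ++ ['1'] := by
          rw [PySem.List.slice_natCast]
          have he : e + 1 - cur = off + 1 := by omega
          rw [he]
          conv_lhs => rw [hdec]
          rw [List.take_append]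
          rw [List.take_of_length_le (by omega)]
          rw [hwlen]
          simp
        have hrec := ih cs (e + 1 + 1)
          (ret ++ [Char.ofNat (pvDecodeChar ((cs.drop cur).take off ++ ['1']))]) (by omega)
        show pvGoA cs fuel (e + 1 + 1)
            (ret ++ [Char.ofNat (pvDecodeChar (PySem.List.slice cs (some (cur : Int)) (some ((e + 1 : Nat) : Int))))])
          = ret ++ pvGoB (cs.drop cur) 0 1 2
        rw [hslice, hrec]
        have hdrop : cs.drop (e + 1 + 1) = (cs.drop cur).drop (off + 2) := by
          rw [List.drop_drop]
          congr 1
          omega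
        conv_rhs => rw [hdec]
        have hseg := pvGoB_seg ((cs.drop cur).take off) ((cs.drop cur).drop (off + 2)) 0 0 hnone
        simp only [show Nat.fib (0 + 2) = 1 by decide, show Nat.fib (0 + 3) = 2 by decide,
          Nat.zero_add] at hseg
        rw [hseg, pvDecodeChar_eq, hdrop]
        simp
    · rw [if_neg hcur]
      rw [List.drop_of_length_le (by omega)]
      simp [pvGoB]

-- ===== VERDICT (by name: the statement is the Claim_ definition above) =====
theorem decode_fibonacci_zeckendorf_spec : Claim_equal_decode_fibonacci_zeckendorf := by
  intro code _hdom _hpre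
  unfold Spec_decode_fibonacci_zeckendorf decode_fibonacci_zeckendorf decode_fibonacci_zeckendorf_alt
  rw [pvGoA_eq (code.toList.length + 1) code.toList 0 [] (by omega)]
  simp
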